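-- pv_equiv track=rewrite | github.com/alestar/InterviewPrep | src/MyPython/PastInterview/CodeSignal/DFSReacheable.py | reachable_vertices
-- ===== SOURCE A (Python) =====
-- def dfs(graph, v, visited, result):
--     visited.add(v)
--     result.append(v)
--     for neighbor in graph.get(v, []):
--         if neighbor not in visited:
--             dfs(graph, neighbor, visited, result)
--
-- def reachable_vertices(graph):
--     all_reachable = {}
--     for vertex in graph:
--         visited = set()
--         result = []
--         dfs(graph, vertex, visited, result)
--         all_reachable[vertex] = result
--     return all_reachable
-- ===== SOURCE B (Python) =====
-- def reachable_vertices(graph):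
--     all_reachable = {}
--     for vertex in graph:
--         visited = set()
--         result = []
--         stack = [vertex]
--         while stack:
--             node = stack.pop()
--             if node in visited:
--                 continue
--             visited.add(node)
--             result.append(node)
--             stack.extend(reversed(graph.get(node, [])))
--         all_reachable[vertex] = result
--     return all_reachable
-- ===== Notes on version B (the rewrite author's own statement) =====
-- stated objective: alternative
-- what changed: The recursive helper dfs is replaced by an iterative explicit-stack traversal that pops a node, skips it if already visited, and pushes its neighbors in reversed order so the exact DFS preorder per source vertex is preserved.
import Mathlib
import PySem

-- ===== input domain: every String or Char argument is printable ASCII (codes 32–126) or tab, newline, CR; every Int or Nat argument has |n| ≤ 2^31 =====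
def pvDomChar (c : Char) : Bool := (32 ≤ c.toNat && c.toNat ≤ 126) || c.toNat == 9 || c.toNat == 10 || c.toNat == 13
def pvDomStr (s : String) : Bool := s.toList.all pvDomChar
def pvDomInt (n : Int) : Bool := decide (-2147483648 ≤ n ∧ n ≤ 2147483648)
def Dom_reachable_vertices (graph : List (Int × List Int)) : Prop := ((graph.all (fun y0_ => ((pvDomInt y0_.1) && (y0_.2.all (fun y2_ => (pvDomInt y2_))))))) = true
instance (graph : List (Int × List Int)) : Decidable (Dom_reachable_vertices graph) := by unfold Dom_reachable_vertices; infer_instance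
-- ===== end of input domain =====

-- B replaces the recursive dfs helper by an iterative explicit-stack traversal (same preorder).
-- Both ports use a fuel counter only as a totality guard; the proofs show it never runs out.

-- shared trivial helpers: graph.get(v, []) and the fuel bound (one more than the total
-- number of vertex occurrences in the graph, an upper bound on the distinct vertices)
def pvNbrs (graph : List (Int × List Int)) (v : Int) : List Int :=
  PySem.Dict.getD (PySem.Dict.mk graph) v []

def pvFuel (graph : List (Int × List Int)) : Nat :=
  (graph.flatMap (fun p => p.1 :: p.2)).length + 1

-- ===== PORT A =====
mutual
  -- dfs(graph, v, visited, result): mark v, append v, then recurse into unvisited neighbors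
  def pvDfsA (graph : List (Int × List Int)) :
      Nat → Int → PySem.Set Int → List Int → (PySem.Set Int × List Int)
    | 0, _, visited, result => (visited, result)
    | f + 1, v, visited, result =>
        pvLoopA graph f (pvNbrs graph v) (PySem.Set.add visited v) (result ++ [v])
  termination_by f _ _ _ => (f, 0)

  -- the 'for neighbor in graph.get(v, [])' loop of dfs
  def pvLoopA (graph : List (Int × List Int)) :
      Nat → List Int → PySem.Set Int → List Int → (PySem.Set Int × List Int)
    | _, [], visited, result => (visited, result)
    | f, n :: ns, visited, result =>
        if PySem.Set.contains visited n then pvLoopA graph f ns visited result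
        else
          let p := pvDfsA graph f n visited result
          pvLoopA graph f ns p.1 p.2
  termination_by f ns _ _ => (f, ns.length + 1)
end

def reachable_vertices (graph : List (Int × List Int)) : List (Int × List Int) :=
  ((PySem.Dict.mk graph).keys.foldl
    (fun acc vertex =>
      PySem.Dict.insert acc vertex
        (pvDfsA graph (pvFuel graph) vertex PySem.Set.empty []).2)
    PySem.Dict.empty).items

-- ===== PORT B =====
-- the 'while stack:' loop: pop, skip if visited, else mark/append and push reversed neighbors
def pvStepB (graph : List (Int × List Int)) :
    Nat → List Int → PySem.Set Int → List Int → List Int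
  | _, [], _, result => result
  | 0, node :: stack, visited, result =>
      if PySem.Set.contains visited node then pvStepB graph 0 stack visited result
      else result
  | f + 1, node :: stack, visited, result =>
      if PySem.Set.contains visited node then pvStepB graph (f + 1) stack visited result
      else
        pvStepB graph f
          ((pvNbrs graph node).reverse.foldl (fun st x => x :: st) stack)
          (PySem.Set.add visited node) (result ++ [node])
  termination_by f stk _ _ => (f, stk.length)

def reachable_vertices_alt (graph : List (Int × List Int)) : List (Int × List Int) :=
  ((PySem.Dict.mk graph).keys.foldl
    (fun acc vertex =>
      PySem.Dict.insert acc vertex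
        (pvStepB graph (pvFuel graph) [vertex] PySem.Set.empty []))
    PySem.Dict.empty).items

-- ===== PRECONDITION & SPEC =====
def Spec_reachable_vertices (graph : List (Int × List Int)) (out : List (Int × List Int)) : Prop := out = reachable_vertices_alt graph
instance (graph : List (Int × List Int)) (out : List (Int × List Int)) : Decidable (Spec_reachable_vertices graph out) := by unfold Spec_reachable_vertices; infer_instance

-- ===== CLAIM (what is proved, stated in full; the proofs are below) =====
def Claim_equal_reachable_vertices : Prop := ∀ (graph : List (Int × List Int)), Dom_reachable_vertices graph → Spec_reachable_vertices graph (reachable_vertices graph)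

-- ===== LEMMAS AND PROOFS =====

-- the multiset of all vertex occurrences in the graph
def pvR (graph : List (Int × List Int)) : List Int := graph.flatMap (fun p => p.1 :: p.2)

-- number of distinct graph vertices not yet visited
def pvUnvis (graph : List (Int × List Int)) (s : PySem.Set Int) : Nat :=
  ((pvR graph).toFinset.filter (fun x => x ∉ s)).card

theorem pvNbrs_subset {graph : List (Int × List Int)} {v x : Int}
    (h : x ∈ pvNbrs graph v) : x ∈ pvR graph := by
  induction graph with
  | nil => simp [pvNbrs, PySem.Dict.getD, PySem.Dict.get?] at h
  | cons p rest ih =>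
      rw [pvNbrs, PySem.Dict.getD_eq_get?_getD, PySem.Dict.get?_mk_cons] at h
      by_cases hk : p.1 == v
      · simp only [hk, if_true, Option.getD_some] at h
        exact List.mem_flatMap.mpr ⟨p, by simp, by simp [h]⟩
      · simp only [hk, Bool.false_eq_true, if_false] at h
        have hx : x ∈ pvR rest := by
          apply ih
          rw [pvNbrs, PySem.Dict.getD_eq_get?_getD]
          exact h
        obtain ⟨q, hq, hxq⟩ := List.mem_flatMap.mp hx
        exact List.mem_flatMap.mpr ⟨q, by simp [hq], hxq⟩

theorem pvUnvis_anti {graph : List (Int × List Int)} {s t : PySem.Set Int}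
    (h : ∀ x ∈ s, x ∈ t) : pvUnvis graph t ≤ pvUnvis graph s := by
  apply Finset.card_le_card
  intro x hx
  simp only [Finset.mem_filter] at hx ⊢
  exact ⟨hx.1, fun hxs => hx.2 (h x hxs)⟩

theorem pvUnvis_add_succ {graph : List (Int × List Int)} {s : PySem.Set Int} {v : Int}
    (hR : v ∈ pvR graph) (hs : v ∉ s) :
    pvUnvis graph (PySem.Set.add s v) + 1 = pvUnvis graph s := by
  have hmem : v ∈ (pvR graph).toFinset.filter (fun x => x ∉ s) := by
    simp [hR, hs]
  have hset : (pvR graph).toFinset.filter (fun x => x ∉ PySem.Set.add s v)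
      = ((pvR graph).toFinset.filter (fun x => x ∉ s)).erase v := by
    ext x
    simp only [Finset.mem_filter, Finset.mem_erase, PySem.Set.mem_add]
    tauto
  have hpos : 0 < ((pvR graph).toFinset.filter (fun x => x ∉ s)).card :=
    Finset.card_pos.mpr ⟨v, hmem⟩
  rw [pvUnvis, hset, Finset.card_erase_of_mem hmem, pvUnvis]
  omega

theorem pvUnvis_pos {graph : List (Int × List Int)} {s : PySem.Set Int} {v : Int}
    (hR : v ∈ pvR graph) (hs : v ∉ s) : 1 ≤ pvUnvis graph s := by
  have : v ∈ (pvR graph).toFinset.filter (fun x => x ∉ s) := by simp [hR, hs]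
  exact Finset.card_pos.mpr ⟨v, this⟩

-- small unfolding lemmas for B's loop
theorem pvStepB_nil (graph : List (Int × List Int)) (f : Nat) (s : PySem.Set Int)
    (r : List Int) : pvStepB graph f [] s r = r := by
  cases f <;> simp [pvStepB]

theorem pvStepB_skip {graph : List (Int × List Int)} {f : Nat} {node : Int}
    {stk : List Int} {s : PySem.Set Int} {r : List Int}
    (h : PySem.Set.contains s node = true) :
    pvStepB graph f (node :: stk) s r = pvStepB graph f stk s r := by
  have hm : node ∈ s := (PySem.Set.contains_iff _ _).mp h
  cases f <;> simp [pvStepB, hm]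

theorem pvStepB_visit {graph : List (Int × List Int)} {f : Nat} {node : Int}
    {stk : List Int} {s : PySem.Set Int} {r : List Int}
    (h : ¬ PySem.Set.contains s node = true) :
    pvStepB graph (f + 1) (node :: stk) s r
      = pvStepB graph f ((pvNbrs graph node).reverse.foldl (fun st x => x :: st) stk)
          (PySem.Set.add s node) (r ++ [node]) := by
  have hm : node ∉ s := fun hin => h ((PySem.Set.contains_iff _ _).mpr hin)
  simp [pvStepB, hm]

-- pushing the reversed neighbor list element-by-element is prepending the neighbor list
theorem pv_foldl_cons {α : Type} (l acc : List α) :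
    l.foldl (fun st x => x :: st) acc = l.reverse ++ acc := by
  induction l generalizing acc with
  | nil => simp
  | cons a l ih => simp [List.foldl_cons, ih]

-- visited only grows in A's dfs / its neighbor loop
theorem pvA_mono (graph : List (Int × List Int)) :
    ∀ f : Nat,
      (∀ v s r, ∀ x ∈ s, x ∈ (pvDfsA graph f v s r).1) ∧
      (∀ ns s r, ∀ x ∈ s, x ∈ (pvLoopA graph f ns s r).1) := by
  intro f
  induction f with
  | zero =>
      constructor
      · intro v s r x hx; simpa [pvDfsA] using hx
      · intro ns s r
        induction ns generalizing s r with
        | nil => intro x hx; simpa [pvLoopA] using hx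
        | cons n ns ih =>
            intro x hx
            by_cases h : PySem.Set.contains s n
            · rw [pvLoopA]; simp only [h, if_true]; exact ih s r x hx
            · rw [pvLoopA]; simp only [h, Bool.false_eq_true, if_false]
              exact ih _ _ x (by simpa [pvDfsA] using hx)
  | succ f ihf =>
      have hdfs : ∀ v s r, ∀ x ∈ s, x ∈ (pvDfsA graph (f + 1) v s r).1 := by
        intro v s r x hx
        rw [pvDfsA]
        exact ihf.2 _ _ _ x (by simp [PySem.Set.mem_add, hx])
      refine ⟨hdfs, ?_⟩
      intro ns
      induction ns with
      | nil => intro s r x hx; simpa [pvLoopA] using hx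
      | cons n ns ih =>
          intro s r x hx
          by_cases h : PySem.Set.contains s n
          · rw [pvLoopA]; simp only [h, if_true]; exact ih s r x hx
          · rw [pvLoopA]; simp only [h, Bool.false_eq_true, if_false]
            exact ih _ _ x (hdfs _ _ _ x hx)

-- B's loop result does not depend on the fuel once the fuel covers the unvisited vertices
theorem pvStepB_stab (graph : List (Int × List Int)) :
    ∀ k s stk r f f', pvUnvis graph s ≤ k →
      (∀ x ∈ stk, x ∈ pvR graph) →
      pvUnvis graph s ≤ f → pvUnvis graph s ≤ f' →
      pvStepB graph f stk s r = pvStepB graph f' stk s r := by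
  intro k
  induction k with
  | zero =>
      intro s stk r f f' hk hstk _ _
      induction stk generalizing r with
      | nil => simp [pvStepB_nil]
      | cons node stack ih =>
          have hmem : PySem.Set.contains s node = true := by
            by_contra h
            have := pvUnvis_pos (hstk node (by simp)) (fun hin => h ((PySem.Set.contains_iff _ _).mpr hin))
            omega
          rw [pvStepB_skip hmem, pvStepB_skip hmem]
          exact ih r (fun x hx => hstk x (by simp [hx]))
  | succ k ihk =>
      intro s stk r f f' hk hstk hf hf'
      induction stk generalizing r with
      | nil => simp [pvStepB_nil]
      | cons node stack ih =>
          by_cases hmem : PySem.Set.contains s node = true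
          · rw [pvStepB_skip hmem, pvStepB_skip hmem]
            exact ih r (fun x hx => hstk x (by simp [hx]))
          · have hnotin : node ∉ s := fun hin => hmem ((PySem.Set.contains_iff _ _).mpr hin)
            have hRn : node ∈ pvR graph := hstk node (by simp)
            have hpos := pvUnvis_pos hRn hnotin
            obtain ⟨a, rfl⟩ : ∃ a, f = a + 1 := ⟨f - 1, by omega⟩
            obtain ⟨b, rfl⟩ : ∃ b, f' = b + 1 := ⟨f' - 1, by omega⟩
            rw [pvStepB_visit hmem, pvStepB_visit hmem]
            have hsucc := pvUnvis_add_succ hRn hnotin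
            apply ihk
            · omega
            · intro x hx
              rw [pv_foldl_cons] at hx
              rcases List.mem_append.mp hx with h1 | h2
              · exact pvNbrs_subset (by simpa using h1)
              · exact hstk x (by simp [h2])
            · omega
            · omega

-- the bridge: running B's stack loop on ns ++ stk first performs A's neighbor loop on ns
theorem pvBridge (graph : List (Int × List Int)) :
    ∀ k s, pvUnvis graph s ≤ k →
      ∀ ns stk r fA fB, (∀ n ∈ ns, n ∈ pvR graph) → (∀ x ∈ stk, x ∈ pvR graph) →
        pvUnvis graph s ≤ fA → pvUnvis graph s ≤ fB →
        pvStepB graph fB (ns ++ stk) s r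
          = pvStepB graph fB stk (pvLoopA graph fA ns s r).1 (pvLoopA graph fA ns s r).2 := by
  intro k
  induction k with
  | zero =>
      intro s hk ns stk r fA fB hns hstk hfA hfB
      induction ns generalizing r with
      | nil => simp [pvLoopA]
      | cons n ns ih =>
          have hmem : PySem.Set.contains s n = true := by
            by_contra h
            have := pvUnvis_pos (hns n (by simp))
              (fun hin => h ((PySem.Set.contains_iff _ _).mpr hin))
            omega
          rw [pvLoopA]
          simp only [hmem, if_true]
          rw [List.cons_append, pvStepB_skip hmem]
          exact ih r (fun x hx => hns x (by simp [hx]))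
  | succ k ihk =>
      intro s₀ hk₀ ns₀ stk r₀ fA₀ fB₀ hns₀ hstk hfA₀ hfB₀
      -- inner induction over the neighbor list, with the state fully quantified
      have inner : ∀ ns, (∀ n ∈ ns, n ∈ pvR graph) →
          ∀ s r fA fB, pvUnvis graph s ≤ k + 1 →
            pvUnvis graph s ≤ fA → pvUnvis graph s ≤ fB →
            pvStepB graph fB (ns ++ stk) s r
              = pvStepB graph fB stk (pvLoopA graph fA ns s r).1 (pvLoopA graph fA ns s r).2 := by
        intro ns
        induction ns with
        | nil => intro _ s r fA fB _ _ _; simp [pvLoopA]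
        | cons n ns ih =>
            intro hns s r fA fB hk hfA hfB
            have hns' : ∀ x ∈ ns, x ∈ pvR graph := fun x hx => hns x (by simp [hx])
            by_cases hmem : PySem.Set.contains s n = true
            · rw [pvLoopA]
              simp only [hmem, if_true]
              rw [List.cons_append, pvStepB_skip hmem]
              exact ih hns' s r fA fB hk hfA hfB
            · have hnotin : n ∉ s := fun hin => hmem ((PySem.Set.contains_iff _ _).mpr hin)
              have hRn : n ∈ pvR graph := hns n (by simp)
              have hpos := pvUnvis_pos hRn hnotin
              have hsucc := pvUnvis_add_succ hRn hnotin
              obtain ⟨a, rfl⟩ : ∃ a, fA = a + 1 := ⟨fA - 1, by omega⟩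
              obtain ⟨b, rfl⟩ : ∃ b, fB = b + 1 := ⟨fB - 1, by omega⟩
              have hvisit : pvStepB graph (b + 1) ((n :: ns) ++ stk) s r
                  = pvStepB graph b (pvNbrs graph n ++ (ns ++ stk))
                      (PySem.Set.add s n) (r ++ [n]) := by
                rw [List.cons_append, pvStepB_visit hmem, pv_foldl_cons, List.reverse_reverse]
              have hloop : pvLoopA graph (a + 1) (n :: ns) s r
                  = pvLoopA graph (a + 1) ns
                      (pvLoopA graph a (pvNbrs graph n) (PySem.Set.add s n) (r ++ [n])).1
                      (pvLoopA graph a (pvNbrs graph n) (PySem.Set.add s n) (r ++ [n])).2 := by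
                rw [pvLoopA]
                simp only [hmem, Bool.false_eq_true, if_false]
                rw [pvDfsA]
              set s₁ := PySem.Set.add s n with hs₁
              set q := pvLoopA graph a (pvNbrs graph n) s₁ (r ++ [n]) with hq
              have hq1 : ∀ x ∈ s₁, x ∈ q.1 := (pvA_mono graph a).2 _ _ _
              have hq1unvis : pvUnvis graph q.1 ≤ pvUnvis graph s₁ :=
                pvUnvis_anti (graph := graph) hq1
              have hmid : ∀ x ∈ ns ++ stk, x ∈ pvR graph := by
                intro x hx
                rcases List.mem_append.mp hx with h1 | h2
                · exact hns' x h1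
                · exact hstk x h2
              have houter := ihk s₁ (by omega) (pvNbrs graph n) (ns ++ stk) (r ++ [n]) a b
                (fun x hx => pvNbrs_subset hx) hmid (by omega) (by omega)
              rw [hvisit, houter, hloop]
              have hstab : pvStepB graph b (ns ++ stk) q.1 q.2
                  = pvStepB graph (b + 1) (ns ++ stk) q.1 q.2 :=
                pvStepB_stab graph (pvUnvis graph q.1) _ _ _ _ _ le_rfl hmid
                  (by omega) (by omega)
              rw [hstab]
              exact ih hns' q.1 q.2 (a + 1) (b + 1) (by omega) (by omega) (by omega)
      exact inner ns₀ hns₀ s₀ r₀ fA₀ fB₀ hk₀ hfA₀ hfB₀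

theorem pvFuel_ge {graph : List (Int × List Int)} {s : PySem.Set Int} :
    pvUnvis graph s ≤ pvFuel graph := by
  have h1 : pvUnvis graph s ≤ (pvR graph).toFinset.card := by
    apply Finset.card_le_card; intro x hx
    exact (Finset.mem_filter.mp hx).1
  have h2 := (pvR graph).toFinset_card_le
  simp only [pvFuel, pvR] at *
  omega

-- per source vertex, B's stack run equals A's dfs run
theorem pvRun_eq {graph : List (Int × List Int)} {v : Int} (hv : v ∈ pvR graph) :
    pvStepB graph (pvFuel graph) [v] PySem.Set.empty []
      = (pvDfsA graph (pvFuel graph) v PySem.Set.empty []).2 := by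
  have hcont : ¬ PySem.Set.contains (PySem.Set.empty (α := Int)) v = true := by
    simp [PySem.Set.empty, PySem.Set.contains]
  have hb := pvBridge graph (pvUnvis graph PySem.Set.empty) PySem.Set.empty le_rfl
    [v] [] [] (pvFuel graph) (pvFuel graph)
    (by intro n hn; simp at hn; subst hn; exact hv)
    (by intro x hx; simp at hx)
    pvFuel_ge pvFuel_ge
  simp only [List.append_nil] at hb
  rw [hb]
  have hloop : pvLoopA graph (pvFuel graph) [v] PySem.Set.empty []
      = pvDfsA graph (pvFuel graph) v PySem.Set.empty [] := by
    rw [pvLoopA]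
    simp only [hcont, Bool.false_eq_true, if_false]
    rw [pvLoopA]
  rw [hloop, pvStepB_nil]

theorem pv_keys_sub {graph : List (Int × List Int)} {v : Int}
    (hv : v ∈ (PySem.Dict.mk graph).keys) : v ∈ pvR graph := by
  simp only [PySem.Dict.keys] at hv
  rcases List.mem_map.mp hv with ⟨p, hp, rfl⟩
  exact List.mem_flatMap.mpr ⟨p, hp, by simp⟩

-- ===== VERDICT (by name: the statement is the Claim_ definition above) =====
theorem reachable_vertices_spec : Claim_equal_reachable_vertices := by
  intro graph _
  unfold Spec_reachable_vertices reachable_vertices reachable_vertices_alt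
  congr 1
  apply PySem.List.foldl_congr_mem
  intro acc v hv
  rw [pvRun_eq (pv_keys_sub hv)]
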